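-- pv_equiv track=rewrite | github.com/fivegrainja/adventofcode2025 | day03/day03.py | get_line_joltage
-- ===== SOURCE A (Python) =====
-- def get_line_joltage(digits: list[int]) -> int:
--     """ Select two digits, A and B, from input list that together as "AB" make
--         the largest possible integer. A must come before B in the list.
--         Return the integer AB
--     """
--     first_digit_i = 0
--     second_digit_i = 1
--     final_i = len(digits) - 1
--     for i in range(1, len(digits)):
--         if i < final_i and digits[i] > digits[first_digit_i]:
--             first_digit_i = i
--             second_digit_i = i + 1
--         elif digits[i] > digits[second_digit_i]:
--             second_digit_i = i
--     result = (10 * digits[first_digit_i]) + digits[second_digit_i]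
--     return result
-- ===== SOURCE B (Python) =====
-- def get_line_joltage(digits: list[int]) -> int:
--     """ Two sequential scans instead of A's coupled single pass:
--         first find the first argmax of the prefix digits[0..n-2],
--         then the max of the suffix after it. """
--     n = len(digits)
--     first_i = 0
--     for i in range(1, n - 1):
--         if digits[i] > digits[first_i]:
--             first_i = i
--     best = digits[first_i + 1]
--     for d in digits[first_i + 2:]:
--         if d > best:
--             best = d
--     return 10 * digits[first_i] + best
-- ===== Notes on version B (the rewrite author's own statement) =====
-- stated objective: alternative
-- what changed: A's single coupled pass tracking two indices is decomposed into two sequential scans: one finds the first argmax of the prefix digits[0..n-2], a second maximizes over the values of the suffix after it.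
-- outside the precondition, e.g. on get_line_joltage([]): A raises IndexError, B raises IndexError; on get_line_joltage([5]): A raises IndexError, B raises IndexError
import Mathlib
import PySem

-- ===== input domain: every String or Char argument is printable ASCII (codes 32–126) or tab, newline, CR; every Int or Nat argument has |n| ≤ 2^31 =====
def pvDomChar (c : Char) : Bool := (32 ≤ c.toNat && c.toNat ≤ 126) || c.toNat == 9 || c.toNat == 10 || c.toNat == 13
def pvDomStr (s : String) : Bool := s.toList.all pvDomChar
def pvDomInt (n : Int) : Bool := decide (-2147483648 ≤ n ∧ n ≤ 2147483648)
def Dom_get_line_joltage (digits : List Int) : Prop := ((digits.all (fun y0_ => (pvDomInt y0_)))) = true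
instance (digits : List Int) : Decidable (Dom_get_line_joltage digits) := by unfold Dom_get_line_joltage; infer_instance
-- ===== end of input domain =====

-- B replaces A's single coupled two-index pass by two sequential scans (prefix argmax, then suffix max over values); same return value, objective: alternative decomposition.

-- ===== PORT A =====
-- A's loop body over state (first_digit_i, second_digit_i)
def stepA (digits : List Int) (finalI : Int) (p : Int × Int) (i : Int) : Int × Int :=
  if i < finalI ∧ PySem.List.pyGetD digits i 0 > PySem.List.pyGetD digits p.1 0 then (i, i + 1)
  else if PySem.List.pyGetD digits i 0 > PySem.List.pyGetD digits p.2 0 then (p.1, i)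
  else p

def get_line_joltage (digits : List Int) : Int :=
  let finalI : Int := (digits.length : Int) - 1
  let st := (PySem.List.pyRange 1 (digits.length : Int) 1).foldl (stepA digits finalI) (0, 1)
  10 * PySem.List.pyGetD digits st.1 0 + PySem.List.pyGetD digits st.2 0

-- ===== PORT B =====
-- B's first loop body: index of the first strict maximum seen so far
def stepF (digits : List Int) (fi i : Int) : Int :=
  if PySem.List.pyGetD digits i 0 > PySem.List.pyGetD digits fi 0 then i else fi

def get_line_joltage_alt (digits : List Int) : Int :=
  let n : Int := (digits.length : Int)
  let firstI := (PySem.List.pyRange 1 (n - 1) 1).foldl (stepF digits) 0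
  let best := (PySem.List.slice digits (some (firstI + 2)) none).foldl
      (fun b d => if d > b then d else b) (PySem.List.pyGetD digits (firstI + 1) 0)
  10 * PySem.List.pyGetD digits firstI 0 + best

-- ===== PRECONDITION & SPEC =====
-- On lists of length < 2 both Pythons raise IndexError (A at digits[1]/digits[0], B at digits[first_i+1]).
def Pre_get_line_joltage (digits : List Int) : Prop := 2 ≤ digits.length
instance (digits : List Int) : Decidable (Pre_get_line_joltage digits) := by unfold Pre_get_line_joltage; infer_instance
def pvWitness_get_line_joltage : List Int := [3, 7]
def Spec_get_line_joltage (digits : List Int) (out : Int) : Prop := out = get_line_joltage_alt digits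
instance (digits : List Int) (out : Int) : Decidable (Spec_get_line_joltage digits out) := by unfold Spec_get_line_joltage; infer_instance

-- ===== CLAIM (what is proved, stated in full; the proofs are below) =====
def Claim_equal_get_line_joltage : Prop := ∀ (digits : List Int), Dom_get_line_joltage digits → Pre_get_line_joltage digits → Spec_get_line_joltage digits (get_line_joltage digits)

-- ===== LEMMAS AND PROOFS =====

-- Invariant of A's loop over range(1, k) for k ≤ n-1: A's state is (f, s) where f is
-- B's prefix argmax over range(1, k) and s is the pending suffix argmax started at f+1.
theorem loopA_invariant (digits : List Int) (m : Nat)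
    (h : (1 : Int) + m ≤ (digits.length : Int) - 1) :
    ((PySem.List.pyRange 1 (1 + (m : Int)) 1).foldl (stepA digits ((digits.length : Int) - 1)) (0, 1)
      = ((PySem.List.pyRange 1 (1 + (m : Int)) 1).foldl (stepF digits) 0,
         (PySem.List.pyRange ((PySem.List.pyRange 1 (1 + (m : Int)) 1).foldl (stepF digits) 0 + 1) (1 + (m : Int)) 1).foldl
           (stepF digits) ((PySem.List.pyRange 1 (1 + (m : Int)) 1).foldl (stepF digits) 0 + 1)))
    ∧ 0 ≤ (PySem.List.pyRange 1 (1 + (m : Int)) 1).foldl (stepF digits) 0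
    ∧ (PySem.List.pyRange 1 (1 + (m : Int)) 1).foldl (stepF digits) 0 < 1 + (m : Int) := by
  induction m with
  | zero =>
      simp [PySem.List.pyRange_one_eq_nil (by omega : (1:Int) ≤ 1)]
  | succ m ih =>
      have hm : (1 : Int) + m ≤ (digits.length : Int) - 1 := by push_cast at h ⊢; omega
      obtain ⟨heq, hf0, hfk⟩ := ih hm
      have hcast : (1 : Int) + ((m + 1 : Nat) : Int) = (1 + (m : Int)) + 1 := by push_cast; ring
      rw [hcast, PySem.List.pyRange_one_succ_right (by omega : (1:Int) ≤ 1 + m)]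
      set k : Int := 1 + (m : Int) with hk
      set f : Int := (PySem.List.pyRange 1 k 1).foldl (stepF digits) 0 with hfdef
      rw [List.foldl_append, List.foldl_append, heq]
      simp only [List.foldl_cons, List.foldl_nil]
      have hklt : k < (digits.length : Int) - 1 := by push_cast at h; omega
      by_cases hc : PySem.List.pyGetD digits k 0 > PySem.List.pyGetD digits f 0
      · have : stepA digits ((digits.length : Int) - 1)
            (f, (PySem.List.pyRange (f + 1) k 1).foldl (stepF digits) (f + 1)) k = (k, k + 1) := by
          simp [stepA, hklt, hc]
        rw [this]
        have hF : stepF digits f k = k := by simp [stepF, hc]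
        rw [hF]
        refine ⟨?_, by omega, by omega⟩
        rw [PySem.List.pyRange_one_eq_nil (by omega : k + 1 ≤ k + 1)]
        rfl
      · have hF : stepF digits f k = f := by simp [stepF, hc]
        rw [hF]
        have hs : stepA digits ((digits.length : Int) - 1)
            (f, (PySem.List.pyRange (f + 1) k 1).foldl (stepF digits) (f + 1)) k
            = (f, stepF digits ((PySem.List.pyRange (f + 1) k 1).foldl (stepF digits) (f + 1)) k) := by
          simp only [stepA, stepF]
          by_cases h2 : PySem.List.pyGetD digits k 0 >
              PySem.List.pyGetD digits ((PySem.List.pyRange (f + 1) k 1).foldl (stepF digits) (f + 1)) 0 <;>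
            simp [hklt, hc, h2]
        rw [hs, PySem.List.pyRange_one_succ_right (by omega : f + 1 ≤ k), List.foldl_append]
        exact ⟨rfl, by omega, by omega⟩

-- folding stepF (an index) tracks, through pyGetD, the fold of the value-level max step
theorem pyGetD_foldl_stepF (digits : List Int) (l : List Int) (r : Int) :
    PySem.List.pyGetD digits (l.foldl (stepF digits) r) 0
      = l.foldl (fun b j => if PySem.List.pyGetD digits j 0 > b then PySem.List.pyGetD digits j 0 else b)
          (PySem.List.pyGetD digits r 0) := by
  induction l generalizing r with
  | nil => rfl
  | cons x xs ih =>
      simp only [List.foldl_cons, stepF]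
      by_cases h : PySem.List.pyGetD digits x 0 > PySem.List.pyGetD digits r 0 <;> simp [h, ih]

theorem get_line_joltage_eq_alt (digits : List Int) (hpre : 2 ≤ digits.length) :
    get_line_joltage digits = get_line_joltage_alt digits := by
  obtain ⟨heq, hf0, hfk⟩ := loopA_invariant digits (digits.length - 2) (by omega)
  have hc : (1 : Int) + ((digits.length - 2 : Nat) : Int) = (digits.length : Int) - 1 := by omega
  rw [hc] at heq hf0 hfk
  simp only [get_line_joltage, get_line_joltage_alt]
  set K : Int := (digits.length : Int) - 1 with hK
  set f : Int := (PySem.List.pyRange 1 K 1).foldl (stepF digits) 0 with hfdef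
  have hsplit : PySem.List.pyRange 1 (digits.length : Int) 1
      = PySem.List.pyRange 1 K 1 ++ [K] := by
    rw [show ((digits.length : Int)) = K + 1 by omega]
    exact PySem.List.pyRange_one_succ_right (by omega)
  rw [hsplit, List.foldl_append, heq]
  simp only [List.foldl_cons, List.foldl_nil]
  set s : Int := (PySem.List.pyRange (f + 1) K 1).foldl (stepF digits) (f + 1) with hsdef
  have hstep : stepA digits K (f, s) K = (f, stepF digits s K) := by
    simp only [stepA, stepF]
    by_cases h2 : PySem.List.pyGetD digits K 0 > PySem.List.pyGetD digits s 0 <;> simp [h2]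
  rw [hstep]
  have hsfin : stepF digits s K
      = (PySem.List.pyRange (f + 1) (digits.length : Int) 1).foldl (stepF digits) (f + 1) := by
    rw [show ((digits.length : Int)) = K + 1 by omega,
        PySem.List.pyRange_one_succ_right (by omega : f + 1 ≤ K), List.foldl_append]
    rfl
  have hval : PySem.List.pyGetD digits (stepF digits s K) 0
      = (List.drop (f + 2).toNat digits).foldl (fun b d => if d > b then d else b)
          (PySem.List.pyGetD digits (f + 1) 0) := by
    rw [hsfin, pyGetD_foldl_stepF]
    rw [PySem.List.pyRange_one_append (f + 1) (f + 2) (digits.length : Int) (by omega) (by omega)]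
    rw [show f + 2 = (f + 1) + 1 by ring, PySem.List.pyRange_one_singleton]
    rw [List.foldl_append]
    simp only [List.foldl_cons, List.foldl_nil, lt_irrefl]
    rw [show (f + 1) + 1 = f + 2 by ring]
    exact PySem.List.foldl_pyRange_pyGetD' digits 0 (fun b d => if d > b then d else b)
      (PySem.List.pyGetD digits (f + 1) 0) (by omega)
  rw [hval, PySem.List.slice_from digits (by omega : (0:Int) ≤ f + 2)]

-- ===== VERDICT (by name: the statement is the Claim_ definition above) =====
theorem get_line_joltage_spec : Claim_equal_get_line_joltage := by
  intro digits _ hpre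
  exact get_line_joltage_eq_alt digits hpre
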